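-- pv_equiv track=rewrite | github.com/pideviq/algorithms | recursion/numbers_sum.py | numbers_sum
-- ===== SOURCE A (Python) =====
-- def numbers_sum(array: list) -> int:
--     """Add up all the numbers in the array and return the total."""
--     try:
--         first = array[0]
--     except IndexError:
--         raise IndexError('array is empty')
--     else:
--         if not isinstance(first, int):
--             raise ValueError('array should consist of integers only')
--         if len(array) > 1:
--             # Recursive case
--             return first + numbers_sum(array[1:])
--         # Base case
--         return first
-- ===== SOURCE B (Python) =====
-- def numbers_sum(array: list) -> int:
--     """Add up all the numbers in the array and return the total."""
--     if not array:
--         raise IndexError('array is empty')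
--     if not all(isinstance(x, int) for x in array):
--         raise ValueError('array should consist of integers only')
--     return sum(array)
-- ===== Notes on version B (the rewrite author's own statement) =====
-- stated objective: faster
-- what changed: Replaced A's interleaved head/tail recursion (validate head, recurse on array[1:]) with an explicit empty guard, a separate all()-validation pass, and a builtin sum(), removing both the recursion and the O(n^2) slicing.
import Mathlib
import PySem

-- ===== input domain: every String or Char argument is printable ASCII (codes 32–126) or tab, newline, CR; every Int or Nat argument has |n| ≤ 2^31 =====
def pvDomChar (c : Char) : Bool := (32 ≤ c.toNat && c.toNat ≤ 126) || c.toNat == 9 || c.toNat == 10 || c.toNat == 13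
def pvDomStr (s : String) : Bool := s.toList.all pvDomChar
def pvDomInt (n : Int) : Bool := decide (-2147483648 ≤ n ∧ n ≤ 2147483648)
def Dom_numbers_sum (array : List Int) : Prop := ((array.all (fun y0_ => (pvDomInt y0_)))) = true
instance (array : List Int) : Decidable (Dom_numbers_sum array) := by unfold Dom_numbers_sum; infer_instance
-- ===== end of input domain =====

-- B replaces A's head/tail recursion with a guard + validation pass + builtin sum (simpler).
-- Both raise IndexError on the empty list; Pre_ excludes it.

-- ===== PORT A =====
-- A: take first element (IndexError on empty, excluded by Pre_), then
-- if len > 1 recurse on array[1:], else return first.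
def numbers_sum : List Int → Int
  | [] => 0  -- unreachable under Pre_ (Python raises IndexError here)
  | first :: rest =>
      if rest.length + 1 > 1 then first + numbers_sum rest
      else first

-- ===== PORT B =====
-- B: empty guard (raise, excluded by Pre_); isinstance validation is vacuous on List Int;
-- then sum(array).
def numbers_sum_alt (array : List Int) : Int :=
  array.sum

-- ===== PRECONDITION & SPEC =====
-- Pre_ excludes the empty list, on which the Python A raises IndexError('array is empty').
def Pre_numbers_sum (array : List Int) : Prop := array ≠ []
instance (array : List Int) : Decidable (Pre_numbers_sum array) := by unfold Pre_numbers_sum; infer_instance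
def pvWitness_numbers_sum : List Int := [1, -2, 3]

def Spec_numbers_sum (array : List Int) (out : Int) : Prop := out = numbers_sum_alt array
instance (array : List Int) (out : Int) : Decidable (Spec_numbers_sum array out) := by unfold Spec_numbers_sum; infer_instance

-- ===== CLAIM (what is proved, stated in full; the proofs are below) =====
def Claim_equal_numbers_sum : Prop := ∀ (array : List Int), Dom_numbers_sum array → Pre_numbers_sum array → Spec_numbers_sum array (numbers_sum array)

-- ===== LEMMAS AND PROOFS =====
theorem numbers_sum_eq_sum : ∀ (array : List Int), numbers_sum array = array.sum
  | [] => by simp [numbers_sum]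
  | first :: rest => by
      cases rest with
      | nil => simp [numbers_sum]
      | cons b t =>
          rw [show numbers_sum (first :: b :: t) = first + numbers_sum (b :: t) from by
                simp [numbers_sum],
              numbers_sum_eq_sum (b :: t)]
          simp

-- ===== VERDICT (by name: the statement is the Claim_ definition above) =====
theorem numbers_sum_spec : Claim_equal_numbers_sum := by
  intro array _ _
  unfold Spec_numbers_sum numbers_sum_alt
  exact numbers_sum_eq_sum array
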